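-- pv_equiv track=rewrite | github.com/sakralen/hsai-genetic-algorithms | routeutils.py | find_parentless
-- ===== SOURCE A (Python) =====
-- def find_parentless(route):
--     route_len = len(route)
--     parentless = []
--
--     for i in range(route_len):
--         parents = [j for j in range(route_len) if route[j] == i]
--         if len(parents) == 0:
--             parentless.append(i)
--
--     return parentless
-- ===== SOURCE B (Python) =====
-- def find_parentless(route):
--     candidates = set(range(len(route)))
--     for v in route:
--         candidates.discard(v)
--     return sorted(candidates)
-- ===== Notes on version B (the rewrite author's own statement) =====
-- stated objective: faster
-- what changed: Replaces A's nested scan (for each index i, rebuild the whole list of positions holding i) with one set-complement pass: start from set(range(n)), discard each value seen in route, return the sorted remainder.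
import Mathlib
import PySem

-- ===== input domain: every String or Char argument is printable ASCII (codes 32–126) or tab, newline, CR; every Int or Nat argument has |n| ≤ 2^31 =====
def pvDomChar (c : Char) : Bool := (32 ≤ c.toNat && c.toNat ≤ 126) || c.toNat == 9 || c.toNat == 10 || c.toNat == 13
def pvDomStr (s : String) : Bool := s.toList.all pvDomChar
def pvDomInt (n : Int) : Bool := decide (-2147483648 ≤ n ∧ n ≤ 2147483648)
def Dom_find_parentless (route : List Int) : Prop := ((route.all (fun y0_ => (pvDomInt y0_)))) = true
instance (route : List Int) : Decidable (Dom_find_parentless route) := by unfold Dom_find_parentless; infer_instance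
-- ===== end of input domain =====

-- B replaces A's quadratic per-index inner scan with one set-complement pass (set(range(n)) minus route's values, then sorted); objective: faster.

-- ===== PORT A =====
def find_parentless (route : List Int) : List Int :=
  let route_len : Int := route.length
  (PySem.List.pyRange 0 route_len 1).foldl
    (fun parentless i =>
      let parents := (PySem.List.pyRange 0 route_len 1).filter
        (fun j => PySem.List.pyGetD route j 0 == i)
      if parents.length == 0 then parentless ++ [i] else parentless)
    []

-- ===== PORT B =====
def find_parentless_alt (route : List Int) : List Int :=
  let candidates : PySem.Set Int := PySem.Set.ofList (PySem.List.pyRange 0 route.length 1)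
  let final : PySem.Set Int := route.foldl (fun s v => PySem.Set.discard s v) candidates
  PySem.List.sorted final (fun x => x) false

-- ===== PRECONDITION & SPEC =====
def Spec_find_parentless (route : List Int) (out : List Int) : Prop := out = find_parentless_alt route
instance (route : List Int) (out : List Int) : Decidable (Spec_find_parentless route out) := by unfold Spec_find_parentless; infer_instance

-- ===== CLAIM (what is proved, stated in full; the proofs are below) =====
def Claim_equal_find_parentless : Prop := ∀ (route : List Int), Dom_find_parentless route → Spec_find_parentless route (find_parentless route)

-- ===== LEMMAS AND PROOFS =====

-- Discarding every element of l is one filter by non-membership in l.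
theorem foldl_discard_eq_filter (l : List Int) (s : List Int) :
    l.foldl (fun s v => PySem.Set.discard s v) s = s.filter (fun y => decide (y ∉ l)) := by
  induction l generalizing s with
  | nil => simp
  | cons v l ih =>
      rw [List.foldl_cons, ih]
      simp only [PySem.Set.discard, List.filter_filter]
      apply List.filter_congr
      intro y _
      by_cases hv : y = v <;> simp [hv]

-- A's result is the ascending filter of the index range by non-membership in route.
theorem find_parentless_eq_filter (route : List Int) :
    find_parentless route
      = (PySem.List.pyRange 0 (route.length : Int) 1).filter (fun i => decide (i ∉ route)) := by
  unfold find_parentless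
  rw [PySem.List.foldl_append_if]
  rw [List.nil_append]
  simp only [List.map_id']
  apply List.filter_congr
  intro i _
  have hroute : (PySem.List.pyRange 0 (route.length : Int) 1).map
      (fun j => PySem.List.pyGetD route j 0) = route :=
    PySem.List.map_pyGetD_pyRange_zero route 0
  have key : ((PySem.List.pyRange 0 (route.length : Int) 1).filter
      (fun j => PySem.List.pyGetD route j 0 == i) = []) ↔ i ∉ route := by
    rw [List.filter_eq_nil_iff]
    constructor
    · intro hall hm
      rw [← hroute] at hm
      rcases List.mem_map.mp hm with ⟨j, hjmem, hji⟩
      exact hall j hjmem (beq_iff_eq.mpr hji)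
    · intro hnot j hjmem hbe
      exact hnot (by rw [← hroute]; exact List.mem_map.mpr ⟨j, hjmem, beq_iff_eq.mp hbe⟩)
  by_cases hi : i ∈ route
  · have hne : (PySem.List.pyRange 0 (route.length : Int) 1).filter
        (fun j => PySem.List.pyGetD route j 0 == i) ≠ [] :=
      fun hnil => (key.mp hnil) hi
    simp [hi, List.length_eq_zero_iff, hne]
  · simp [hi, key.mpr hi]

-- ===== VERDICT (by name: the statement is the Claim_ definition above) =====
theorem find_parentless_spec : Claim_equal_find_parentless := by
  intro route _
  unfold Spec_find_parentless find_parentless_alt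
  show find_parentless route
      = PySem.List.sorted
          (route.foldl (fun s v => PySem.Set.discard s v)
            (PySem.Set.ofList (PySem.List.pyRange 0 (route.length : Int) 1)))
          (fun x => x) false
  rw [PySem.Set.ofList_eq_self_of_nodup _ (PySem.List.nodup_pyRange_one 0 _),
    foldl_discard_eq_filter, find_parentless_eq_filter]
  exact (PySem.List.sorted_eq_self_of_pairwise _ _
    (List.Pairwise.imp (fun h => le_of_lt h)
      (List.Pairwise.filter _ (PySem.List.pairwise_lt_pyRange_one 0 _)))).symm
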